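-- pv_equiv track=rewrite | github.com/janasoumen/Python | NTPL.py | hillvalley
-- ===== SOURCE A (Python) =====
-- def descenByAscen(l):
--     for i in range(0,len(l)-1):
--         if l[i]<l[i+1]:
--             pos=i
--             break
--     else:
--         return False
--     for j in range(pos,len(l)-1):
--         if l[j]>=l[j+1]:
--             return False
--     return True
--
-- def ascenByDescen(l):
--     for i in range(0,len(l)-1):
--         if l[i]>l[i+1]:
--             pos=i
--             break
--     else:
--         return False
--     for j in range(pos,len(l)-1):
--         if l[j]<=l[j+1]:
--             return False
--     return True
--
-- def hillvalley(l):
--     if len(l) < 2: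
--         return False
--     for i in range(len(l)-1):
--         if l[i] == l[i+1]:
--             return False
--     if l[0] > l[1]:
--         return descenByAscen(l)
--     return ascenByDescen(l)
-- ===== SOURCE B (Python) =====
-- def hillvalley(l):
--     # derivative signs of adjacent pairs, then require no flat steps and exactly one direction change
--     signs = []
--     for a, b in zip(l, l[1:]):
--         signs.append(1 if a < b else (-1 if a > b else 0))
--     if not signs or 0 in signs:
--         return False
--     return sum(1 for s, t in zip(signs, signs[1:]) if s != t) == 1
-- ===== Notes on version B (the rewrite author's own statement) =====
-- stated objective: simpler
-- what changed: Replaced A's two direction-specific helpers (find-first-turn, then verify monotone tail) with a single pass that builds the list of adjacent comparison signs and returns True iff it is nonempty, has no zeros, and has exactly one sign change.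
import Mathlib
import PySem

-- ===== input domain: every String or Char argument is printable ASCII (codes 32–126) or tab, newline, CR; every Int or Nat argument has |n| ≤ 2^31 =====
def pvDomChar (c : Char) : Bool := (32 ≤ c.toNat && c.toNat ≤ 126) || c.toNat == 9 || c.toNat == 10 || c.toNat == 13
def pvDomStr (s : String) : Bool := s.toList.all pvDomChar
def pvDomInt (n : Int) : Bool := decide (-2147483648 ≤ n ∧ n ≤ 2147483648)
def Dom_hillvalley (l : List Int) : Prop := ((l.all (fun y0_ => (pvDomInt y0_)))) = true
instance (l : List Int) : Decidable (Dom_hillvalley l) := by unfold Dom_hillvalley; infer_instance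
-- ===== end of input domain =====

-- B replaces A's two direction-specific helpers with one pass over adjacent comparison signs
-- (no zeros, exactly one sign change); objective: simpler.


-- ===== PORT A =====
-- second loop of descenByAscen: 'for j in range(pos, len-1): if l[j] >= l[j+1]: return False'
def checkStrictInc : List Int → Bool
  | a :: b :: rest => if a ≥ b then false else checkStrictInc (b :: rest)
  | _ => true

-- first loop of descenByAscen: scan for the first i with l[i] < l[i+1]; 'else: return False'
def descenByAscenLoop : List Int → Bool
  | a :: b :: rest => if a < b then checkStrictInc (a :: b :: rest) else descenByAscenLoop (b :: rest)
  | _ => false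

def descenByAscen (l : List Int) : Bool := descenByAscenLoop l

-- second loop of ascenByDescen
def checkStrictDec : List Int → Bool
  | a :: b :: rest => if a ≤ b then false else checkStrictDec (b :: rest)
  | _ => true

-- first loop of ascenByDescen
def ascenByDescenLoop : List Int → Bool
  | a :: b :: rest => if a > b then checkStrictDec (a :: b :: rest) else ascenByDescenLoop (b :: rest)
  | _ => false

def ascenByDescen (l : List Int) : Bool := ascenByDescenLoop l

-- 'for i in range(len(l)-1): if l[i] == l[i+1]: return False'
def noAdjEq : List Int → Bool
  | a :: b :: rest => if a == b then false else noAdjEq (b :: rest)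
  | _ => true

def hillvalley (l : List Int) : Bool :=
  match l with
  | a :: b :: _ =>
      if !(noAdjEq l) then false
      else if a > b then descenByAscen l
      else ascenByDescen l
  | _ => false  -- len(l) < 2

-- ===== PORT B =====
def hvSign (a b : Int) : Int := if a < b then 1 else if a > b then -1 else 0

-- 'signs' built from zip(l, l[1:])
def hvSigns (l : List Int) : List Int := (l.zip l.tail).map (fun p => hvSign p.1 p.2)

def hillvalley_alt (l : List Int) : Bool :=
  if hvSigns l = [] ∨ (hvSigns l).contains 0 then false
  else (((hvSigns l).zip (hvSigns l).tail).countP (fun p => p.1 ≠ p.2)) == 1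

-- ===== PRECONDITION & SPEC =====
def Spec_hillvalley (l : List Int) (out : Bool) : Prop := out = hillvalley_alt l
instance (l : List Int) (out : Bool) : Decidable (Spec_hillvalley l out) := by unfold Spec_hillvalley; infer_instance

-- ===== CLAIM (what is proved, stated in full; the proofs are below) =====
def Claim_equal_hillvalley : Prop := ∀ (l : List Int), Dom_hillvalley l → Spec_hillvalley l (hillvalley l)

-- ===== LEMMAS AND PROOFS =====

-- number of sign changes, as B computes it
def hvChanges (s : List Int) : Nat := (s.zip s.tail).countP (fun p => p.1 ≠ p.2)

lemma hvSigns_cons (a b : Int) (r : List Int) :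
    hvSigns (a :: b :: r) = hvSign a b :: hvSigns (b :: r) := by
  simp [hvSigns]

lemma hvChanges_cons (x y : Int) (r : List Int) :
    hvChanges (x :: y :: r) = (if x ≠ y then 1 else 0) + hvChanges (y :: r) := by
  simp [hvChanges, List.countP_cons, Nat.add_comm]

lemma checkStrictInc_eq : ∀ l : List Int, checkStrictInc l = (hvSigns l).all (· == 1)
  | [] => by simp [checkStrictInc, hvSigns]
  | [a] => by simp [checkStrictInc, hvSigns]
  | a :: b :: r => by
      rw [hvSigns_cons]
      by_cases h : a < b
      · simp [checkStrictInc, hvSign, h, not_le.mpr h, checkStrictInc_eq (b :: r)]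
      · simp [checkStrictInc, hvSign, h, le_of_not_gt h]
        intro he; omega

lemma checkStrictDec_eq : ∀ l : List Int, checkStrictDec l = (hvSigns l).all (· == -1)
  | [] => by simp [checkStrictDec, hvSigns]
  | [a] => by simp [checkStrictDec, hvSigns]
  | a :: b :: r => by
      rw [hvSigns_cons]
      by_cases h : b < a
      · simp [checkStrictDec, hvSign, h, not_le.mpr h, not_lt.mpr (le_of_lt h),
          checkStrictDec_eq (b :: r)]
      · simp [checkStrictDec, hvSign, h, le_of_not_gt h]
        intro he; omega

-- shape of a valley's sign list: skip until a 1, then everything must be 1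
def downUp : List Int → Bool
  | [] => false
  | x :: r => if x = 1 then r.all (· == 1) else downUp r

def upDown : List Int → Bool
  | [] => false
  | x :: r => if x = -1 then r.all (· == -1) else upDown r

lemma descenLoop_eq : ∀ l : List Int, descenByAscenLoop l = downUp (hvSigns l)
  | [] => by simp [descenByAscenLoop, hvSigns, downUp]
  | [a] => by simp [descenByAscenLoop, hvSigns, downUp]
  | a :: b :: r => by
      rw [hvSigns_cons]
      by_cases h : a < b
      · rw [show hvSign a b = 1 by simp [hvSign, h]]
        simp [descenByAscenLoop, h, downUp, checkStrictInc_eq (a :: b :: r), hvSigns_cons,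
          hvSign]
      · have hs : hvSign a b ≠ 1 := by simp [hvSign, h]; intro h'; omega
        simp [descenByAscenLoop, h, downUp, hs, descenLoop_eq (b :: r)]

lemma ascenLoop_eq : ∀ l : List Int, ascenByDescenLoop l = upDown (hvSigns l)
  | [] => by simp [ascenByDescenLoop, hvSigns, upDown]
  | [a] => by simp [ascenByDescenLoop, hvSigns, upDown]
  | a :: b :: r => by
      rw [hvSigns_cons]
      by_cases h : b < a
      · rw [show hvSign a b = -1 by simp [hvSign, h, not_lt.mpr (le_of_lt h)]]
        simp [ascenByDescenLoop, upDown, checkStrictDec_eq (a :: b :: r), hvSigns_cons,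
          hvSign, h, not_lt.mpr (le_of_lt h)]
      · have hs : hvSign a b ≠ -1 := by simp [hvSign]; intro _; omega
        simp [ascenByDescenLoop, h, upDown, hs, ascenLoop_eq (b :: r)]

lemma noAdjEq_iff : ∀ l : List Int, noAdjEq l = true ↔ (0 : Int) ∉ hvSigns l
  | [] => by simp [noAdjEq, hvSigns]
  | [a] => by simp [noAdjEq, hvSigns]
  | a :: b :: r => by
      rw [hvSigns_cons]
      by_cases h : a = b
      · subst h
        simp [noAdjEq, hvSign]
      · have hs : hvSign a b ≠ 0 := by simp [hvSign]; omega
        simp [noAdjEq, h, noAdjEq_iff (b :: r), Ne.symm hs]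

lemma sign_cases (a b : Int) : hvSign a b = 1 ∨ hvSign a b = 0 ∨ hvSign a b = -1 := by
  unfold hvSign; split_ifs <;> simp

lemma signs_cases (l : List Int) : ∀ x ∈ hvSigns l, x = 1 ∨ x = 0 ∨ x = -1 := by
  intro x hx
  simp [hvSigns] at hx
  obtain ⟨a, b, _, rfl⟩ := hx
  exact sign_cases a b

lemma changes_zero_iff : ∀ (x : Int) (r : List Int),
    hvChanges (x :: r) = 0 ↔ ∀ z ∈ r, z = x
  | x, [] => by simp [hvChanges]
  | x, y :: r => by
      rw [hvChanges_cons]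
      by_cases hxy : x = y
      · subst hxy
        have ih := changes_zero_iff x r
        rw [if_neg (by simp : ¬ x ≠ x), Nat.zero_add]
        constructor
        · intro hc z hz
          rcases List.mem_cons.mp hz with rfl | hz'
          · rfl
          · exact ih.mp hc z hz'
        · intro hall
          exact ih.mpr (fun z hz => hall z (List.mem_cons_of_mem _ hz))
      · simp only [ne_eq, hxy, not_false_eq_true, if_pos]
        constructor
        · omega
        · intro hall
          exact absurd (hall y (by simp)) (fun h => hxy h.symm)

lemma downUp_changes : ∀ r : List Int, (∀ x ∈ r, x = 1 ∨ x = -1) →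
    downUp ((-1 : Int) :: r) = (hvChanges ((-1 : Int) :: r) == 1)
  | [], _ => by simp [downUp, hvChanges]
  | y :: r, h => by
      rcases h y (by simp) with hy | hy <;> subst hy
      · have hdu : downUp ((-1 : Int) :: 1 :: r) = r.all (· == 1) := by simp [downUp]
        rw [hdu, hvChanges_cons, if_pos (by norm_num)]
        by_cases hall : ∀ z ∈ r, z = (1 : Int)
        · have hc : hvChanges ((1 : Int) :: r) = 0 := (changes_zero_iff _ _).mpr hall
          rw [hc]
          simpa using hall
        · have hc : hvChanges ((1 : Int) :: r) ≠ 0 :=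
            fun hc => hall ((changes_zero_iff _ _).mp hc)
          have hra : r.all (· == 1) = false := by
            rcases Bool.eq_false_or_eq_true (r.all (· == 1)) with hb | hb
            · exact absurd (by simpa [List.all_eq_true] using hb) hall
            · exact hb
          rw [hra]
          simpa using hc
      · have hdu : downUp ((-1 : Int) :: (-1 : Int) :: r) = downUp ((-1 : Int) :: r) := by
          simp [downUp]
        rw [hdu, downUp_changes r (fun x hx => h x (by simp [hx])), hvChanges_cons]
        simp
  termination_by r => r.length

lemma upDown_changes : ∀ r : List Int, (∀ x ∈ r, x = 1 ∨ x = -1) →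
    upDown ((1 : Int) :: r) = (hvChanges ((1 : Int) :: r) == 1)
  | [], _ => by simp [upDown, hvChanges]
  | y :: r, h => by
      rcases h y (by simp) with hy | hy <;> subst hy
      · have hdu : upDown ((1 : Int) :: (1 : Int) :: r) = upDown ((1 : Int) :: r) := by
          simp [upDown]
        rw [hdu, upDown_changes r (fun x hx => h x (by simp [hx])), hvChanges_cons]
        simp
      · have hdu : upDown ((1 : Int) :: (-1 : Int) :: r) = r.all (· == -1) := by simp [upDown]
        rw [hdu, hvChanges_cons, if_pos (by norm_num)]
        by_cases hall : ∀ z ∈ r, z = (-1 : Int)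
        · have hc : hvChanges ((-1 : Int) :: r) = 0 := (changes_zero_iff _ _).mpr hall
          rw [hc]
          simpa using hall
        · have hc : hvChanges ((-1 : Int) :: r) ≠ 0 :=
            fun hc => hall ((changes_zero_iff _ _).mp hc)
          have hra : r.all (· == -1) = false := by
            rcases Bool.eq_false_or_eq_true (r.all (· == -1)) with hb | hb
            · exact absurd (by simpa [List.all_eq_true] using hb) hall
            · exact hb
          rw [hra]
          simpa using hc
  termination_by r => r.length

-- ===== VERDICT (by name: the statement is the Claim_ definition above) =====
theorem hillvalley_spec : Claim_equal_hillvalley := by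
  intro l _
  unfold Spec_hillvalley
  match l with
  | [] => rfl
  | [a] => rfl
  | a :: b :: r =>
    show hillvalley (a :: b :: r) = hillvalley_alt (a :: b :: r)
    by_cases hz : (0 : Int) ∈ hvSigns (a :: b :: r)
    · -- some adjacent pair is equal: both sides are false
      have hno : noAdjEq (a :: b :: r) = false := by
        rcases Bool.eq_false_or_eq_true (noAdjEq (a :: b :: r)) with hb | hb
        · exact absurd hz ((noAdjEq_iff _).mp hb)
        · exact hb
      show (if !(noAdjEq (a :: b :: r)) then false
            else if a > b then descenByAscen (a :: b :: r) else ascenByDescen (a :: b :: r))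
          = hillvalley_alt (a :: b :: r)
      rw [hno]
      unfold hillvalley_alt
      rw [if_pos (Or.inr (by simpa using hz))]
      rfl
    · have hno : noAdjEq (a :: b :: r) = true := (noAdjEq_iff _).mpr hz
      have hne : hvSigns (a :: b :: r) ≠ [] := by rw [hvSigns_cons]; simp
      have hnz : ∀ x ∈ hvSigns (a :: b :: r), x = 1 ∨ x = -1 := by
        intro x hx
        rcases signs_cases _ x hx with h | h | h
        · exact Or.inl h
        · exact absurd (h ▸ hx) hz
        · exact Or.inr h
      have hmem : hvSign a b ∈ hvSigns (a :: b :: r) := by rw [hvSigns_cons]; simp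
      have hrmem : ∀ x ∈ hvSigns (b :: r), x = 1 ∨ x = -1 := fun x hx =>
        hnz x (by rw [hvSigns_cons]; exact List.mem_cons_of_mem _ hx)
      have hrhs : hillvalley_alt (a :: b :: r) = (hvChanges (hvSigns (a :: b :: r)) == 1) := by
        unfold hillvalley_alt
        rw [if_neg (not_or.mpr ⟨hne, by simpa using hz⟩)]
        rfl
      show (if !(noAdjEq (a :: b :: r)) then false
            else if a > b then descenByAscen (a :: b :: r) else ascenByDescen (a :: b :: r))
          = hillvalley_alt (a :: b :: r)
      rw [hno, hrhs]
      simp only [Bool.not_true, Bool.false_eq_true, if_false]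
      by_cases hab : b < a
      · have hs : hvSign a b = -1 := by simp [hvSign, hab, not_lt.mpr (le_of_lt hab)]
        rw [if_pos (show a > b from hab)]
        calc descenByAscen (a :: b :: r)
            = downUp (hvSigns (a :: b :: r)) := descenLoop_eq _
          _ = downUp ((-1 : Int) :: hvSigns (b :: r)) := by rw [hvSigns_cons, hs]
          _ = (hvChanges ((-1 : Int) :: hvSigns (b :: r)) == 1) := downUp_changes _ hrmem
          _ = (hvChanges (hvSigns (a :: b :: r)) == 1) := by rw [hvSigns_cons, hs]
      · have hab' : a < b := by
          rcases hnz (hvSign a b) hmem with h | h <;> unfold hvSign at h <;>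
            split_ifs at h <;> first | assumption | omega
        have hs : hvSign a b = 1 := by simp [hvSign, hab']
        rw [if_neg (show ¬ a > b from hab)]
        calc ascenByDescen (a :: b :: r)
            = upDown (hvSigns (a :: b :: r)) := ascenLoop_eq _
          _ = upDown ((1 : Int) :: hvSigns (b :: r)) := by rw [hvSigns_cons, hs]
          _ = (hvChanges ((1 : Int) :: hvSigns (b :: r)) == 1) := upDown_changes _ hrmem
          _ = (hvChanges (hvSigns (a :: b :: r)) == 1) := by rw [hvSigns_cons, hs]
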